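-- pv_equiv track=rewrite | github.com/pypi-data/pypi-mirror-403 | packages/MF-Algebra/mf_algebra-0.5.5.tar.gz/mf_algebra-0.5.5/src/MF_Algebra/utils.py | add_spaces_around_brackets
-- ===== SOURCE A (Python) =====
-- def add_spaces_around_brackets(input_string):
-- 	result = []
-- 	i = 0
-- 	length = len(input_string)
--
-- 	for i in range(length):
-- 		if input_string[i:i+2] == '{{':
-- 			result.append('{ ')
-- 		elif input_string[i:i+2] == '}}':
-- 			result.append('} ')
-- 		else:
-- 			result.append(input_string[i])
--
-- 	# Join the list into a single string and remove any extra spaces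
-- 	return ''.join(result).strip()
-- ===== SOURCE B (Python) =====
-- def add_spaces_around_brackets(input_string):
--     out = []
--     prev = ''
--     for ch in input_string:
--         if ch == prev and ch in '{}':
--             out.append(' ')
--         out.append(ch)
--         prev = ch
--     return ''.join(out).strip()
-- ===== Notes on version B (the rewrite author's own statement) =====
-- stated objective: simpler
-- what changed: A loops over indices and builds and compares a fresh two-character slice of the string at every position; B is a single previous-character state machine over the characters that inserts a space whenever the current brace character repeats the previous one, with no slicing or index arithmetic.
import Mathlib
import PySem

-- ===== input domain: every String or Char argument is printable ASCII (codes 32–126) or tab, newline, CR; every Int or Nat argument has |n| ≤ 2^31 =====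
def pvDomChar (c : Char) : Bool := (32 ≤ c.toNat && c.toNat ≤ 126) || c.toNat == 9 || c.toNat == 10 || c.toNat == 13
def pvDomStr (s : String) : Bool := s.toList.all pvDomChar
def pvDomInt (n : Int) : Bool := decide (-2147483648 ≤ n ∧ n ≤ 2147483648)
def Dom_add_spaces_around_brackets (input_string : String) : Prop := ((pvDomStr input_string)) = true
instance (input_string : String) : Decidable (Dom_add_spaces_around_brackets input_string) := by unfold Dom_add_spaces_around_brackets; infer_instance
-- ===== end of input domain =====

-- ===== PORT A =====
-- B replaces A's per-index two-character-slice loop by a single previous-character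
-- state machine (simpler, and measured faster by a constant factor); same return value.
def add_spaces_around_brackets (input_string : String) : String :=
  let length := PySem.Str.len input_string
  let result : List String :=
    (PySem.List.pyRange 0 length).foldl (fun result i =>
      if PySem.Str.slice input_string (some i) (some (i + 2)) = "{{" then
        result ++ ["{ "]
      else if PySem.Str.slice input_string (some i) (some (i + 2)) = "}}" then
        result ++ ["} "]
      else
        -- input_string[i], always in range here (i < length)
        result ++ [((PySem.Str.pyGet? input_string i).map (fun c => String.ofList [c])).getD ""]) []
  PySem.Str.strip (PySem.Str.join "" result)

-- ===== PORT B =====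
-- the for-loop of Source B: `prev` starts as none (Python's '', never equal to a char)
def altLoop (prev : Option Char) (cs : List Char) (out : List String) : List String :=
  match cs with
  | [] => out
  | c :: rest =>
    let out' := if some c = prev ∧ (c = '{' ∨ c = '}') then out ++ [" "] else out
    altLoop (some c) rest (out' ++ [String.ofList [c]])

def add_spaces_around_brackets_alt (input_string : String) : String :=
  PySem.Str.strip (PySem.Str.join "" (altLoop none input_string.toList []))

-- ===== PRECONDITION & SPEC =====
def Spec_add_spaces_around_brackets (input_string : String) (out : String) : Prop := out = add_spaces_around_brackets_alt input_string
instance (input_string : String) (out : String) : Decidable (Spec_add_spaces_around_brackets input_string out) := by unfold Spec_add_spaces_around_brackets; infer_instance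

-- ===== CLAIM (what is proved, stated in full; the proofs are below) =====
def Claim_equal_add_spaces_around_brackets : Prop := ∀ (input_string : String), Dom_add_spaces_around_brackets input_string → Spec_add_spaces_around_brackets input_string (add_spaces_around_brackets input_string)

-- ===== LEMMAS AND PROOFS =====

-- characters A emits: a lookahead piece per position
def combA : List Char → List Char
  | [] => []
  | c :: rest =>
    (if rest.head? = some c ∧ (c = '{' ∨ c = '}') then [c, ' '] else [c]) ++ combA rest

-- characters B emits: a lookbehind piece per position
def combB (prev : Option Char) : List Char → List Char
  | [] => []
  | c :: rest =>
    (if some c = prev ∧ (c = '{' ∨ c = '}') then [' ', c] else [c]) ++ combB (some c) rest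

lemma join_nil_flatten (l : List (List Char)) : PySem.Chars.join [] l = l.flatten := by
  induction l with
  | nil => rfl
  | cons x xs ih =>
    cases xs with
    | nil => simp [PySem.Chars.join, List.intercalate]
    | cons y ys =>
      simp only [PySem.Chars.join, List.intercalate] at *
      simp only [List.intersperse] at *
      simp_all

lemma altLoop_flat (cs : List Char) : ∀ (prev : Option Char) (out : List String),
    ((altLoop prev cs out).map String.toList).flatten
      = (out.map String.toList).flatten ++ combB prev cs := by
  induction cs with
  | nil => intro prev out; simp [altLoop, combB]
  | cons c rest ih =>
    intro prev out
    simp only [altLoop, combB]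
    split
    · simp [ih]
    · simp [ih]

-- the per-index piece of A, as a function of cs[i]? and cs[i+1]?
def pieceA (cs : List Char) (i : Nat) : List Char :=
  match cs[i]? with
  | none => []
  | some c => if cs[i+1]? = some c ∧ (c = '{' ∨ c = '}') then [c, ' '] else [c]

lemma range_pieceA (cs : List Char) :
    (List.range cs.length).flatMap (pieceA cs) = combA cs := by
  induction cs with
  | nil => rfl
  | cons c rest ih =>
    rw [List.length_cons, List.range_succ_eq_map]
    simp only [List.flatMap_cons, List.flatMap_map]
    have h2 : (List.range rest.length).flatMap (fun i => pieceA (c :: rest) (Nat.succ i))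
        = (List.range rest.length).flatMap (pieceA rest) :=
      List.flatMap_congr (fun i _ => rfl)
    rw [h2, ih]
    simp [pieceA, combA, List.head?_eq_getElem?]

-- lookahead and lookbehind emit the same characters
lemma combA_eq_combB_aux (cs : List Char) : ∀ c : Char, combA (c :: cs) = c :: combB (some c) cs := by
  induction cs with
  | nil => intro c; simp [combA, combB]
  | cons c' rest ih =>
    intro c
    have hA : combA (c :: c' :: rest)
        = (if some c' = some c ∧ (c = '{' ∨ c = '}') then [c, ' '] else [c]) ++ combA (c' :: rest) := rfl
    have hB : combB (some c) (c' :: rest)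
        = (if some c' = some c ∧ (c' = '{' ∨ c' = '}') then [' ', c'] else [c']) ++ combB (some c') rest := rfl
    rw [hA, ih c', hB]
    by_cases h : c' = c ∧ (c = '{' ∨ c = '}')
    · obtain ⟨he, hb⟩ := h
      subst he
      rw [if_pos ⟨rfl, hb⟩, if_pos ⟨rfl, hb⟩]
      simp
    · have h1 : ¬ (some c' = some c ∧ (c = '{' ∨ c = '}')) := by
        intro hx; exact h ⟨by injection hx.1, hx.2⟩
      have h2 : ¬ (some c' = some c ∧ (c' = '{' ∨ c' = '}')) := by
        intro hx
        obtain ⟨he, hb⟩ := hx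
        injection he with e
        exact h ⟨e, e ▸ hb⟩
      rw [if_neg h1, if_neg h2]
      simp

lemma combA_eq_combB (cs : List Char) : combA cs = combB none cs := by
  cases cs with
  | nil => rfl
  | cons c rest =>
    rw [combA_eq_combB_aux rest c]
    simp [combB]

-- the string piece A appends at in-range index i has character list pieceA cs i
lemma gA_toList (s : String) (i : Nat) (h : i < s.toList.length) :
    (if PySem.Str.slice s (some (i : Int)) (some ((i : Int) + 2)) = "{{" then ("{ " : String)
     else if PySem.Str.slice s (some (i : Int)) (some ((i : Int) + 2)) = "}}" then "} "
     else ((PySem.Str.pyGet? s (i : Int)).map (fun c => String.ofList [c])).getD "").toList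
      = pieceA s.toList i := by
  have hs : (PySem.Str.slice s (some (i : Int)) (some ((i : Int) + 2))).toList
      = (s.toList.drop i).take 2 := by
    rw [PySem.Str.toList_slice]
    have h2 : ((i : Int) + 2) = ((i : Int) + ((2 : Nat) : Int)) := by norm_num
    rw [h2]
    exact PySem.List.slice_natCast_add s.toList i 2
  have hget : PySem.Str.pyGet? s (i : Int) = some s.toList[i] := by
    rw [PySem.Str.pyGet?_natCast, List.getElem?_eq_getElem h]
  have hdrop : s.toList.drop i = s.toList[i] :: s.toList.drop (i + 1) := List.drop_eq_getElem_cons h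
  have hEq : ∀ t : String,
      (PySem.Str.slice s (some (i : Int)) (some ((i : Int) + 2)) = t)
        ↔ ((s.toList.drop i).take 2 = t.toList) := by
    intro t; rw [← String.toList_inj, hs]
  cases hrest : s.toList.drop (i + 1) with
  | nil =>
    have h1 : s.toList[i+1]? = none := by
      have := (List.getElem?_drop (xs := s.toList) (i := i + 1) (j := 0))
      simp only [hrest] at this
      simpa using this.symm
    have e1 : ("{{" : String).toList = ['{', '{'] := rfl
    have e2 : ("}}" : String).toList = ['}', '}'] := rfl
    simp only [hEq, hdrop, hrest, pieceA, List.getElem?_eq_getElem h, h1, List.take, e1, e2]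
    rw [if_neg (by simp), if_neg (by simp)]
    simp [List.getElem?_eq_getElem h]
  | cons d tl =>
    have h1 : s.toList[i+1]? = some d := by
      have := (List.getElem?_drop (xs := s.toList) (i := i + 1) (j := 0))
      simp only [hrest] at this
      simpa using this.symm
    have htake : (s.toList.drop i).take 2 = [s.toList[i], d] := by
      rw [hdrop, hrest]; rfl
    simp only [hEq, htake, pieceA, List.getElem?_eq_getElem h, h1]
    by_cases hb : d = s.toList[i] ∧ (s.toList[i] = '{' ∨ s.toList[i] = '}')
    · obtain ⟨he, hb2⟩ := hb
      rcases hb2 with hb2 | hb2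
      · rw [if_pos (by rw [hb2, he, hb2]; rfl), if_pos ⟨by rw [he], Or.inl hb2⟩]
        rw [hb2]; rfl
      · rw [if_neg (by rw [hb2, he, hb2]; decide), if_pos (by rw [hb2, he, hb2]; rfl),
            if_pos ⟨by rw [he], Or.inr hb2⟩]
        rw [hb2]; rfl
    · have hn1 : ¬ ([s.toList[i], d] = ("{{" : String).toList) := by
        intro hx
        have e1 : ("{{" : String).toList = ['{', '{'] := rfl
        rw [e1] at hx
        simp only [List.cons.injEq, and_true] at hx
        exact hb ⟨by rw [hx.1, hx.2], Or.inl hx.1⟩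
      have hn2 : ¬ ([s.toList[i], d] = ("}}" : String).toList) := by
        intro hx
        have e2 : ("}}" : String).toList = ['}', '}'] := rfl
        rw [e2] at hx
        simp only [List.cons.injEq, and_true] at hx
        exact hb ⟨by rw [hx.1, hx.2], Or.inr hx.1⟩
      rw [if_neg hn1, if_neg hn2, if_neg (by intro hx; exact hb ⟨by injection hx.1, hx.2⟩)]
      simp [List.getElem?_eq_getElem h]

-- A's characters
lemma A_chars (s : String) :
    (add_spaces_around_brackets s).toList = PySem.Chars.strip (combA s.toList) := by
  unfold add_spaces_around_brackets
  simp only [PySem.Str.len_eq]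
  have hfun : (fun (result : List String) (i : Int) =>
      if PySem.Str.slice s (some i) (some (i + 2)) = "{{" then result ++ ["{ "]
      else if PySem.Str.slice s (some i) (some (i + 2)) = "}}" then result ++ ["} "]
      else result ++ [((PySem.Str.pyGet? s i).map (fun c => String.ofList [c])).getD ""])
      = fun (result : List String) (i : Int) => result ++
        [if PySem.Str.slice s (some i) (some (i + 2)) = "{{" then "{ "
         else if PySem.Str.slice s (some i) (some (i + 2)) = "}}" then "} "
         else ((PySem.Str.pyGet? s i).map (fun c => String.ofList [c])).getD ""] := by
    funext result i; split_ifs <;> rfl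
  rw [hfun, PySem.List.foldl_append_eq_flatMap]
  rw [PySem.Str.toList_strip, PySem.Str.toList_join]
  have e0 : ("" : String).toList = ([] : List Char) := rfl
  rw [e0, join_nil_flatten]
  congr 1
  rw [List.nil_append]
  set g : Int → String := fun i =>
    if PySem.Str.slice s (some i) (some (i + 2)) = "{{" then "{ "
    else if PySem.Str.slice s (some i) (some (i + 2)) = "}}" then "} "
    else ((PySem.Str.pyGet? s i).map (fun c => String.ofList [c])).getD "" with hg
  have h1 : ∀ l : List Int, l.flatMap (fun i => [g i]) = l.map g := by
    intro l
    induction l with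
    | nil => rfl
    | cons a t ih => simp [ih]
  rw [h1, List.map_map, ← List.flatMap_def, PySem.List.pyRange_one, List.flatMap_map]
  simp only [sub_zero, Int.toNat_natCast, zero_add, Function.comp]
  rw [← range_pieceA s.toList]
  refine List.flatMap_congr (fun k hk => ?_)
  have hk' : k < s.toList.length := List.mem_range.mp hk
  simpa [hg] using gA_toList s k hk'

-- B's characters
lemma B_chars (s : String) :
    (add_spaces_around_brackets_alt s).toList = PySem.Chars.strip (combB none s.toList) := by
  unfold add_spaces_around_brackets_alt
  rw [PySem.Str.toList_strip, PySem.Str.toList_join]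
  have e0 : ("" : String).toList = ([] : List Char) := rfl
  rw [e0, join_nil_flatten, altLoop_flat]
  simp

-- ===== VERDICT (by name: the statement is the Claim_ definition above) =====
theorem add_spaces_around_brackets_spec : Claim_equal_add_spaces_around_brackets := by
  intro s _
  unfold Spec_add_spaces_around_brackets
  rw [← String.toList_inj, A_chars, B_chars, combA_eq_combB]
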